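-- pv_equiv track=rewrite | github.com/XethalKhan/srb-challenge-2020-zuhlke | src/task5/calculate.py | optimalCoin
-- ===== SOURCE A (Python) =====
-- def optimalCoin(doors):
--
-- 	ending_coins = 0
--
-- 	if doors % 2 == 0:
-- 		ending_coins = 4
-- 	else:
-- 		ending_coins = 3
--
-- 	result = 0
--
-- 	for i in range(doors - ending_coins, 0, -2):
-- 		result += pow(2, i + 1)
--
-- 	result += ending_coins
--
-- 	return result
-- ===== SOURCE B (Python) =====
-- def optimalCoin(doors):
--     ending = 4 if doors % 2 == 0 else 3
--     m = (doors - ending) // 2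
--     if m <= 0:
--         return ending
--     return 2 * (4 ** (m + 1) - 4) // 3 + ending
-- ===== Notes on version B (the rewrite author's own statement) =====
-- stated objective: faster
-- what changed: Replaced the O(doors) loop summing pow(2, i+1) over range(doors-ending, 0, -2) with the closed-form geometric-series sum 2*(4**(m+1)-4)//3 where m=(doors-ending)//2.
import Mathlib
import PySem

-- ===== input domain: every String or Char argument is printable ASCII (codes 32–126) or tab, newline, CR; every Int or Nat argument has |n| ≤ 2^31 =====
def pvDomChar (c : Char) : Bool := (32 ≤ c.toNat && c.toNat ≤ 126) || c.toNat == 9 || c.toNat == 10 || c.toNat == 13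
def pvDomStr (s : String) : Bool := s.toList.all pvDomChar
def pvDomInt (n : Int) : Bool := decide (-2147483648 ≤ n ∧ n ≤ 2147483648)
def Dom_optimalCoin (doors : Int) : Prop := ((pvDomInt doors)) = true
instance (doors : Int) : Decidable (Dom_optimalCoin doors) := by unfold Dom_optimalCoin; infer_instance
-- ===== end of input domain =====

-- B replaces A's linear loop over range(doors-ending, 0, -2) by the closed-form
-- geometric-series sum (objective: faster, asymptotic).

-- ===== PORT A =====
def optimalCoin (doors : Int) : Int :=
  let ending_coins : Int := if PySem.Int.mod doors 2 = 0 then 4 else 3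
  let result : Int :=
    (PySem.List.pyRange (doors - ending_coins) 0 (-2)).foldl
      (fun r i => r + 2 ^ (i + 1).toNat) 0
  result + ending_coins

-- ===== PORT B =====
def optimalCoin_alt (doors : Int) : Int :=
  let ending : Int := if PySem.Int.mod doors 2 = 0 then 4 else 3
  let m : Int := PySem.Int.floordiv (doors - ending) 2
  if m ≤ 0 then ending
  else PySem.Int.floordiv (2 * (4 ^ (m + 1).toNat - 4)) 3 + ending

-- ===== PRECONDITION & SPEC =====
def Spec_optimalCoin (doors : Int) (out : Int) : Prop := out = optimalCoin_alt doors
instance (doors : Int) (out : Int) : Decidable (Spec_optimalCoin doors out) := by unfold Spec_optimalCoin; infer_instance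

-- ===== CLAIM (what is proved, stated in full; the proofs are below) =====
def Claim_equal_optimalCoin : Prop := ∀ (doors : Int), Dom_optimalCoin doors → Spec_optimalCoin doors (optimalCoin doors)

-- ===== LEMMAS AND PROOFS =====

-- range(a, 0, -2) peels its head when 0 < a
theorem pyRange_neg_two_cons (a : Int) (ha : 0 < a) :
    PySem.List.pyRange a 0 (-2) = a :: PySem.List.pyRange (a - 2) 0 (-2) := by
  norm_num [PySem.List.pyRange, ha]
  have hc : ((a + 2 - 1) / 2).toNat = (if 2 < a then ((a - 1) / 2).toNat else 0) + 1 := by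
    split_ifs with h <;> omega
  rw [hc, List.range_succ_eq_map]
  simp only [List.map_cons, List.map_map, Nat.cast_zero]
  refine List.cons_eq_cons.mpr ⟨by ring, ?_⟩
  exact List.map_congr_left (fun k _ => by simp [Function.comp]; ring)

theorem pyRange_neg_two_nil (a : Int) (ha : a ≤ 0) :
    PySem.List.pyRange a 0 (-2) = [] := by
  norm_num [PySem.List.pyRange, not_lt.mpr ha]

theorem fold_init (l : List Int) (c : Int) :
    l.foldl (fun r i => r + 2 ^ (i + 1).toNat) c
      = c + l.foldl (fun r i => r + 2 ^ (i + 1).toNat) 0 := by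
  induction l generalizing c with
  | nil => simp
  | cons x xs ih => simp only [List.foldl_cons]; rw [ih, ih (0 + _)]; ring

-- closed form for A's loop (times 3, to stay division-free)
theorem loop_sum (n : Nat) :
    ((PySem.List.pyRange (2 * (n : Int)) 0 (-2)).foldl
      (fun r i => r + 2 ^ (i + 1).toNat) 0) * 3 = 2 * ((4 : Int) ^ (n + 1) - 4) := by
  induction n with
  | zero => rw [pyRange_neg_two_nil _ (by norm_num)]; norm_num
  | succ n ih =>
    have h : (2 * ((n + 1 : Nat) : Int)) = (2 * (n : Int)) + 2 := by push_cast; ring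
    rw [h, pyRange_neg_two_cons _ (by omega), List.foldl_cons, fold_init]
    have ht : ((2 * (n : Int) + 2 - 2)) = 2 * (n : Int) := by ring
    rw [ht]
    have hx : ((2 * (n : Int) + 2 + 1).toNat) = 2 * n + 3 := by omega
    rw [hx]
    have h4 : (2 : Int) ^ (2 * n + 3) = 2 * 4 ^ (n + 1) := by
      rw [show (4:Int) = 2^2 by norm_num, ← pow_mul]; ring
    have h42 : (4 : Int) ^ (n + 1 + 1) = 4 * 4 ^ (n + 1) := by ring
    rw [h42]
    linarith [ih, h4]

-- ===== VERDICT (by name: the statement is the Claim_ definition above) =====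
theorem optimalCoin_spec : Claim_equal_optimalCoin := by
  intro doors _
  simp only [Spec_optimalCoin, optimalCoin, optimalCoin_alt]
  have hmod : PySem.Int.mod doors 2 = doors % 2 :=
    PySem.Int.mod_eq_emod_of_pos (by norm_num)
  set e : Int := if PySem.Int.mod doors 2 = 0 then 4 else 3 with he
  have heven : ∃ m : Int, doors - e = 2 * m := by
    rw [he, hmod]
    by_cases h : doors % 2 = 0
    · rw [if_pos h]; exact ⟨(doors - 4) / 2, by omega⟩
    · rw [if_neg h]; exact ⟨(doors - 3) / 2, by omega⟩
  obtain ⟨m, hm⟩ := heven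
  have hfd : PySem.Int.floordiv (doors - e) 2 = m := by
    rw [PySem.Int.floordiv_eq_ediv_of_pos (by norm_num), hm]; omega
  rw [hfd]
  by_cases hml : m ≤ 0
  · rw [if_pos hml, pyRange_neg_two_nil _ (by omega)]
    simp
  · rw [if_neg hml]
    have hn : doors - e = 2 * ((m.toNat : Nat) : Int) := by omega
    rw [hn]
    have h1 : (m + 1).toNat = m.toNat + 1 := by omega
    rw [h1]
    have hls := loop_sum m.toNat
    have hdiv : PySem.Int.floordiv (2 * ((4 : Int) ^ (m.toNat + 1) - 4)) 3
        = (PySem.List.pyRange (2 * ((m.toNat : Nat) : Int)) 0 (-2)).foldl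
            (fun r i => r + 2 ^ (i + 1).toNat) 0 := by
      rw [PySem.Int.floordiv_eq_ediv_of_pos (by norm_num : (0:Int) < 3)]
      omega
    rw [hdiv]
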